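-- pv_equiv track=rewrite | github.com/biswajit8106/HealthMate | ReportAnalyzer/chatbot.py | is_medical_report
-- ===== SOURCE A (Python) =====
-- def is_medical_report(text):
--     medical_keywords = [
--         "hemoglobin", "wbc", "rbc", "glucose", "platelets", "x-ray", "ct scan",
--         "mri", "blood test", "cholesterol", "liver function", "kidney function",
--         "diagnosis", "symptoms", "medications", "precautions", "patient", "disease",
--         "treatment", "recommended", "summary", "allergy", "immune", "reaction",
--         "treatment plan", "follow-up", "consultation", "prescription", "appointment"
--     ]
--     text_lower = text.lower()
--     return any(keyword in text_lower for keyword in medical_keywords)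
-- ===== SOURCE B (Python) =====
-- # First-character index: at each text position only the keywords starting with
-- # that character are tested, via a dict from first char to keyword tails.
-- _INDEX = {
--     "h": ["emoglobin"],
--     "w": ["bc"],
--     "r": ["bc", "ecommended", "eaction"],
--     "g": ["lucose"],
--     "p": ["latelets", "recautions", "atient", "rescription"],
--     "x": ["-ray"],
--     "c": ["t scan", "holesterol", "onsultation"],
--     "m": ["ri", "edications"],
--     "b": ["lood test"],
--     "l": ["iver function"],
--     "k": ["idney function"],
--     "d": ["iagnosis", "isease"],
--     "s": ["ymptoms", "ummary"],
--     "t": ["reatment", "reatment plan"],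
--     "a": ["llergy", "ppointment"],
--     "i": ["mmune"],
--     "f": ["ollow-up"],
-- }
--
-- def is_medical_report(text):
--     t = text.lower()
--     for i, c in enumerate(t):
--         for tail in _INDEX.get(c, ()):
--             if t.startswith(tail, i + 1):
--                 return True
--     return False
-- ===== Notes on version B (the rewrite author's own statement) =====
-- stated objective: alternative
-- what changed: Replaces A's keyword-major loop of per-keyword substring membership scans over a flat keyword list with a single position-major pass over the text driven by a first-character index (a dict from first letter to keyword tails), so at each position only keywords starting with that character are tested.
import Mathlib
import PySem

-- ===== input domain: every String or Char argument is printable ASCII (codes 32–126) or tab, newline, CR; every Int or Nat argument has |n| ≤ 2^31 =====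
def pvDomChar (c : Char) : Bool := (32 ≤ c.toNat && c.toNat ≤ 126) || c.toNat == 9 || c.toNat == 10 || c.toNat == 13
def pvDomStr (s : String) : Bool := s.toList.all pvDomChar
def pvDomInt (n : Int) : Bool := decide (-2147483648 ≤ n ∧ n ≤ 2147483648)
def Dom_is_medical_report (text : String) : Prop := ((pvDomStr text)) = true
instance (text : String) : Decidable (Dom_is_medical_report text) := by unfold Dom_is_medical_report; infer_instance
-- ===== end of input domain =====

-- B replaces A's per-keyword substring scan with one position-major pass over the
-- text driven by a first-character index (first letter -> keyword tails); alternative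
-- decomposition/data structure, same worst-case cost.

-- ===== PORT A =====
def pvMedicalKeywords : List String := [
  "hemoglobin", "wbc", "rbc", "glucose", "platelets", "x-ray", "ct scan",
  "mri", "blood test", "cholesterol", "liver function", "kidney function",
  "diagnosis", "symptoms", "medications", "precautions", "patient", "disease",
  "treatment", "recommended", "summary", "allergy", "immune", "reaction",
  "treatment plan", "follow-up", "consultation", "prescription", "appointment"
]

def is_medical_report (text : String) : Bool :=
  let text_lower := PySem.Str.lower text
  -- any(keyword in text_lower for keyword in medical_keywords)
  pvMedicalKeywords.any (fun keyword => PySem.Str.isIn keyword text_lower)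

-- ===== PORT B =====
-- _INDEX: first character -> tails of the keywords starting with it (a dict literal)
def pvIndex : PySem.Dict Char (List String) := PySem.Dict.ofList [
  ('h', ["emoglobin"]),
  ('w', ["bc"]),
  ('r', ["bc", "ecommended", "eaction"]),
  ('g', ["lucose"]),
  ('p', ["latelets", "recautions", "atient", "rescription"]),
  ('x', ["-ray"]),
  ('c', ["t scan", "holesterol", "onsultation"]),
  ('m', ["ri", "edications"]),
  ('b', ["lood test"]),
  ('l', ["iver function"]),
  ('k', ["idney function"]),
  ('d', ["iagnosis", "isease"]),
  ('s', ["ymptoms", "ummary"]),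
  ('t', ["reatment", "reatment plan"]),
  ('a', ["llergy", "ppointment"]),
  ('i', ["mmune"]),
  ('f', ["ollow-up"])
]

-- the 'for i, c in enumerate(t): for tail in _INDEX.get(c, ()): if t.startswith(tail, i+1)'
-- loop, as recursion over the remaining suffix: 'c' is the char at position i and
-- t.startswith(tail, i+1) is exactly 'tail is a prefix of the rest'
def pvScanMedical : List Char → Bool
  | [] => false
  | c :: rest =>
    if (PySem.Dict.getD pvIndex c []).any
        (fun tail => PySem.Chars.startswith rest tail.toList) then
      true
    else
      pvScanMedical rest

def is_medical_report_alt (text : String) : Bool :=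
  pvScanMedical (PySem.Str.lower text).toList

-- ===== PRECONDITION & SPEC =====
def Spec_is_medical_report (text : String) (out : Bool) : Prop := out = is_medical_report_alt text
instance (text : String) (out : Bool) : Decidable (Spec_is_medical_report text out) := by unfold Spec_is_medical_report; infer_instance

-- ===== CLAIM (what is proved, stated in full; the proofs are below) =====
def Claim_equal_is_medical_report : Prop := ∀ (text : String), Dom_is_medical_report text → Spec_is_medical_report text (is_medical_report text)

-- ===== LEMMAS AND PROOFS =====

-- the index lookup at a position is exactly 'some whole keyword starts here'
set_option maxHeartbeats 2000000 in
theorem pv_step (c : Char) (rest : List Char) :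
    ((PySem.Dict.getD pvIndex c []).any
        (fun tail => PySem.Chars.startswith rest tail.toList))
      = pvMedicalKeywords.any (fun k => PySem.Chars.startswith (c :: rest) k.toList) := by
  have h : pvIndex = PySem.Dict.mk [
    ('h', ["emoglobin"]), ('w', ["bc"]), ('r', ["bc", "ecommended", "eaction"]),
    ('g', ["lucose"]), ('p', ["latelets", "recautions", "atient", "rescription"]),
    ('x', ["-ray"]), ('c', ["t scan", "holesterol", "onsultation"]),
    ('m', ["ri", "edications"]), ('b', ["lood test"]), ('l', ["iver function"]),
    ('k', ["idney function"]), ('d', ["iagnosis", "isease"]), ('s', ["ymptoms", "ummary"]),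
    ('t', ["reatment", "reatment plan"]), ('a', ["llergy", "ppointment"]),
    ('i', ["mmune"]), ('f', ["ollow-up"])] := by decide
  rw [h]
  simp only [PySem.Dict.getD, PySem.Dict.get?_mk_cons]
  by_cases h1 : ('h' == c) = true
  · rw [if_pos h1]
    obtain rfl : 'h' = c := by simpa using h1
    simp [pvMedicalKeywords, PySem.Chars.startswith, List.isPrefixOf]
  · rw [if_neg h1]
    by_cases h2 : ('w' == c) = true
    · rw [if_pos h2]
      obtain rfl : 'w' = c := by simpa using h2
      simp [pvMedicalKeywords, PySem.Chars.startswith, List.isPrefixOf]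
    · rw [if_neg h2]
      by_cases h3 : ('r' == c) = true
      · rw [if_pos h3]
        obtain rfl : 'r' = c := by simpa using h3
        simp [pvMedicalKeywords, PySem.Chars.startswith, List.isPrefixOf]
      · rw [if_neg h3]
        by_cases h4 : ('g' == c) = true
        · rw [if_pos h4]
          obtain rfl : 'g' = c := by simpa using h4
          simp [pvMedicalKeywords, PySem.Chars.startswith, List.isPrefixOf]
        · rw [if_neg h4]
          by_cases h5 : ('p' == c) = true
          · rw [if_pos h5]
            obtain rfl : 'p' = c := by simpa using h5
            simp [pvMedicalKeywords, PySem.Chars.startswith, List.isPrefixOf]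
          · rw [if_neg h5]
            by_cases h6 : ('x' == c) = true
            · rw [if_pos h6]
              obtain rfl : 'x' = c := by simpa using h6
              simp [pvMedicalKeywords, PySem.Chars.startswith, List.isPrefixOf]
            · rw [if_neg h6]
              by_cases h7 : ('c' == c) = true
              · rw [if_pos h7]
                obtain rfl : 'c' = c := by simpa using h7
                simp [pvMedicalKeywords, PySem.Chars.startswith, List.isPrefixOf]
              · rw [if_neg h7]
                by_cases h8 : ('m' == c) = true
                · rw [if_pos h8]
                  obtain rfl : 'm' = c := by simpa using h8
                  simp [pvMedicalKeywords, PySem.Chars.startswith, List.isPrefixOf]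
                · rw [if_neg h8]
                  by_cases h9 : ('b' == c) = true
                  · rw [if_pos h9]
                    obtain rfl : 'b' = c := by simpa using h9
                    simp [pvMedicalKeywords, PySem.Chars.startswith, List.isPrefixOf]
                  · rw [if_neg h9]
                    by_cases h10 : ('l' == c) = true
                    · rw [if_pos h10]
                      obtain rfl : 'l' = c := by simpa using h10
                      simp [pvMedicalKeywords, PySem.Chars.startswith, List.isPrefixOf]
                    · rw [if_neg h10]
                      by_cases h11 : ('k' == c) = true
                      · rw [if_pos h11]
                        obtain rfl : 'k' = c := by simpa using h11
                        simp [pvMedicalKeywords, PySem.Chars.startswith, List.isPrefixOf]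
                      · rw [if_neg h11]
                        by_cases h12 : ('d' == c) = true
                        · rw [if_pos h12]
                          obtain rfl : 'd' = c := by simpa using h12
                          simp [pvMedicalKeywords, PySem.Chars.startswith, List.isPrefixOf]
                        · rw [if_neg h12]
                          by_cases h13 : ('s' == c) = true
                          · rw [if_pos h13]
                            obtain rfl : 's' = c := by simpa using h13
                            simp [pvMedicalKeywords, PySem.Chars.startswith, List.isPrefixOf]
                          · rw [if_neg h13]
                            by_cases h14 : ('t' == c) = true
                            · rw [if_pos h14]
                              obtain rfl : 't' = c := by simpa using h14
                              simp [pvMedicalKeywords, PySem.Chars.startswith, List.isPrefixOf]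
                            · rw [if_neg h14]
                              by_cases h15 : ('a' == c) = true
                              · rw [if_pos h15]
                                obtain rfl : 'a' = c := by simpa using h15
                                simp [pvMedicalKeywords, PySem.Chars.startswith, List.isPrefixOf]
                              · rw [if_neg h15]
                                by_cases h16 : ('i' == c) = true
                                · rw [if_pos h16]
                                  obtain rfl : 'i' = c := by simpa using h16
                                  simp [pvMedicalKeywords, PySem.Chars.startswith, List.isPrefixOf]
                                · rw [if_neg h16]
                                  by_cases h17 : ('f' == c) = true
                                  · rw [if_pos h17]
                                    obtain rfl : 'f' = c := by simpa using h17
                                    simp [pvMedicalKeywords, PySem.Chars.startswith, List.isPrefixOf]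
                                  · rw [if_neg h17]
                                    simp [pvMedicalKeywords, PySem.Chars.startswith, List.isPrefixOf, PySem.Dict.get?, h1, h2, h3, h4, h5, h6, h7, h8, h9, h10, h11, h12, h13, h14, h15, h16, h17]

-- B's scan finds a keyword iff it is a prefix of some suffix of the text
theorem pv_scan_iff (s : List Char) :
    pvScanMedical s = true ↔
      ∃ i, i < s.length ∧
        pvMedicalKeywords.any (fun k => PySem.Chars.startswith (s.drop i) k.toList) = true := by
  induction s with
  | nil => simp [pvScanMedical]
  | cons c rest ih =>
    rw [pvScanMedical]
    split_ifs with hstep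
    · rw [pv_step] at hstep
      simp only [true_iff]
      exact ⟨0, by simp, hstep⟩
    · rw [pv_step] at hstep
      simp only [Bool.not_eq_true] at hstep
      rw [ih]
      constructor
      · rintro ⟨i, hi, hany⟩
        exact ⟨i + 1, by simpa using hi, by simpa using hany⟩
      · rintro ⟨i, hi, hany⟩
        cases i with
        | zero => simp only [List.drop_zero] at hany; rw [hstep] at hany; cases hany
        | succ j => exact ⟨j, by simpa using hi, by simpa using hany⟩

-- no keyword is empty, so a match as a prefix of s.drop i forces i < s.length
theorem pv_kw_ne_nil : ∀ k ∈ pvMedicalKeywords, k.toList ≠ [] := by decide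

-- 'sub in s' for nonempty sub holds iff sub is a prefix of some suffix s.drop i, i < len
theorem pv_isIn_iff (sub s : List Char) (hne : sub ≠ []) :
    PySem.Chars.isIn sub s = true ↔ ∃ i, i < s.length ∧ sub <+: s.drop i := by
  rw [← PySem.Chars.exists_prefix_drop_iff_isIn]
  constructor
  · rintro ⟨j, hj⟩
    by_cases h : j < s.length
    · exact ⟨j, h, hj⟩
    · rw [List.drop_eq_nil_of_le (by omega)] at hj
      exact absurd (List.prefix_nil.mp hj) hne
  · rintro ⟨i, _, hi⟩; exact ⟨i, hi⟩

-- ===== VERDICT (by name: the statement is the Claim_ definition above) =====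
theorem is_medical_report_spec : Claim_equal_is_medical_report := by
  intro text _
  show is_medical_report text = is_medical_report_alt text
  unfold is_medical_report is_medical_report_alt
  rw [Bool.eq_iff_iff, pv_scan_iff]
  simp only [List.any_eq_true, PySem.Str.isIn_iff_infix, ← PySem.Chars.isIn_iff_infix,
    PySem.Chars.startswith_iff]
  constructor
  · rintro ⟨k, hk, hin⟩
    obtain ⟨i, hi, hpre⟩ := (pv_isIn_iff k.toList _ (pv_kw_ne_nil k hk)).mp hin
    exact ⟨i, hi, k, hk, hpre⟩
  · rintro ⟨i, hi, k, hk, hpre⟩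
    exact ⟨k, hk, (pv_isIn_iff k.toList _ (pv_kw_ne_nil k hk)).mpr ⟨i, hi, hpre⟩⟩
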